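-- pv_equiv track=rewrite | github.com/simontuckwell/cloudns_sdk | cloudns_sdk/utils.py | process_params
-- ===== SOURCE A (Python) =====
-- def process_params(record_data, params):
--     keys_to_check = ['domain_name', 'record_type', 'record_id', 'record', 'host', 'ttl', 'priority', 'weight', 'port',
--                      'frame', 'frame_title', 'frame_keywords',
--                      'frame_description', 'mobile_meta', 'save_path', 'redirect_type', 'mail', 'txt',
--                      'algorithm', 'fptype', 'status', 'geodns_location', 'geodns_code', 'caa_flag',
--                      'caa_type', 'caa_value', 'tlsa_selector', 'tlsa_usage', 'tlsa_matching_type',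
--                      'key_tag', 'digest_type', 'order', 'pref', 'flag', 'params', 'regexp', 'replace',
--                      'cert_type', 'cert_key_tag', 'cert_algorithm', 'lat_deg', 'lat_min', 'lat_sec',
--                      'lat_dir', 'long_deg', 'long_min', 'long_sec', 'long_dir', 'altitude', 'size',
--                      'h_precision', 'v_precision', 'cpu', 'os']
--
--     keys_to_retain_underscore = {'caa_flag', 'caa_type', 'caa_value', 'tlsa_selector', 'tlsa_usage',
--                                  'tlsa_matching_type'}
--
--     for key in keys_to_check:
--         if key in record_data and record_data[key] is not None:
--             if key in keys_to_retain_underscore: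
--                 params[key] = record_data[key]
--             else:
--                 params[key.replace('_', '-')] = record_data[key]
--
--     return params
-- ===== SOURCE B (Python) =====
-- _KEYS = ['domain_name', 'record_type', 'record_id', 'record', 'host', 'ttl', 'priority', 'weight', 'port',
--          'frame', 'frame_title', 'frame_keywords',
--          'frame_description', 'mobile_meta', 'save_path', 'redirect_type', 'mail', 'txt',
--          'algorithm', 'fptype', 'status', 'geodns_location', 'geodns_code', 'caa_flag',
--          'caa_type', 'caa_value', 'tlsa_selector', 'tlsa_usage', 'tlsa_matching_type',
--          'key_tag', 'digest_type', 'order', 'pref', 'flag', 'params', 'regexp', 'replace',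
--          'cert_type', 'cert_key_tag', 'cert_algorithm', 'lat_deg', 'lat_min', 'lat_sec',
--          'lat_dir', 'long_deg', 'long_min', 'long_sec', 'long_dir', 'altitude', 'size',
--          'h_precision', 'v_precision', 'cpu', 'os']
--
-- _RETAIN = frozenset({'caa_flag', 'caa_type', 'caa_value', 'tlsa_selector', 'tlsa_usage',
--                      'tlsa_matching_type'})
--
-- # rank + renamed key per whitelisted key, computed once at import time
-- _INFO = {k: (i, k if k in _RETAIN else k.replace('_', '-')) for i, k in enumerate(_KEYS)}
--
--
-- def process_params(record_data, params):
--     # one pass over the DATA (not the whitelist), scattering hits tagged with their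
--     # whitelist rank, then a sort by rank restores the whitelist insertion order
--     hits = sorted((info + (v,)
--                    for k, v in record_data.items()
--                    if v is not None and (info := _INFO.get(k)) is not None),
--                   key=lambda t: t[0])
--     for _, new_key, v in hits:
--         params[new_key] = v
--     return params
-- ===== Notes on version B (the rewrite author's own statement) =====
-- stated objective: alternative
-- what changed: B inverts the traversal: instead of A's scan of the 53-key whitelist with a membership test and lookup per key, B makes one pass over record_data itself, collecting (rank, renamed-key, value) hits via a rank/rename table precomputed at import time, sorts the hits by whitelist rank and replays them into params.
import Mathlib
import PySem

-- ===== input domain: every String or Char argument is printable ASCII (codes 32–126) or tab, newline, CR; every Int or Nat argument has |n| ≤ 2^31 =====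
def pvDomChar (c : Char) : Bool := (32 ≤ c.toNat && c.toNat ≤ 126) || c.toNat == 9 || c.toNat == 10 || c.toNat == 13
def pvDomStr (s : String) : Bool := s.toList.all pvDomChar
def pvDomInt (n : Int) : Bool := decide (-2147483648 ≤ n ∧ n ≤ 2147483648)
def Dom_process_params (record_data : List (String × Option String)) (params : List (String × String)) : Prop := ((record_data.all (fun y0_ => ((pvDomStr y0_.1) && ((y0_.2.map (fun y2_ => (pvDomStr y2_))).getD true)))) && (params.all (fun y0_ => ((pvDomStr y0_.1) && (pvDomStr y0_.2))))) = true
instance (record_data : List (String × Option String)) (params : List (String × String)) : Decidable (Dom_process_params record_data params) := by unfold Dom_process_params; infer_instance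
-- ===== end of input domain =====

-- B inverts the traversal: one pass over record_data scattering hits tagged with their
-- whitelist rank, then a sort by rank, instead of A's scan of the whitelist with a lookup
-- per key (objective: alternative). Both Pythons mutate `params` in place; the equivalence
-- proved here is about the return value.

-- ===== PORT A =====
-- shared literal constants of the module
def pvKeysToCheck : List String :=
  ["domain_name", "record_type", "record_id", "record", "host", "ttl", "priority", "weight", "port",
   "frame", "frame_title", "frame_keywords",
   "frame_description", "mobile_meta", "save_path", "redirect_type", "mail", "txt",
   "algorithm", "fptype", "status", "geodns_location", "geodns_code", "caa_flag",
   "caa_type", "caa_value", "tlsa_selector", "tlsa_usage", "tlsa_matching_type",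
   "key_tag", "digest_type", "order", "pref", "flag", "params", "regexp", "replace",
   "cert_type", "cert_key_tag", "cert_algorithm", "lat_deg", "lat_min", "lat_sec",
   "lat_dir", "long_deg", "long_min", "long_sec", "long_dir", "altitude", "size",
   "h_precision", "v_precision", "cpu", "os"]

def pvRetain : PySem.Set String :=
  PySem.Set.ofList ["caa_flag", "caa_type", "caa_value", "tlsa_selector", "tlsa_usage",
                    "tlsa_matching_type"]

def process_params (record_data : List (String × Option String)) (params : List (String × String)) : List (String × String) :=
  (pvKeysToCheck.foldl (fun acc key =>
      -- `key in record_data and record_data[key] is not None`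
      match (PySem.Dict.mk record_data).get? key with
      | some (some v) =>
          if PySem.Set.contains pvRetain key then
            acc.insert key v
          else
            acc.insert (PySem.Str.replace key "_" "-") v
      | _ => acc)
    (PySem.Dict.mk params)).items

-- ===== PORT B =====
-- _INFO = {k: (i, k if k in _RETAIN else k.replace('_', '-')) for i, k in enumerate(_KEYS)}
def pvInfo : PySem.Dict String (Int × String) :=
  PySem.Dict.mk ((PySem.List.enumerate pvKeysToCheck).map (fun p =>
    (p.2, (p.1, if PySem.Set.contains pvRetain p.2 then p.2 else PySem.Str.replace p.2 "_" "-"))))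

def process_params_alt (record_data : List (String × Option String)) (params : List (String × String)) : List (String × String) :=
  -- hits = sorted((info + (v,) for k, v in record_data.items()
  --                if v is not None and (info := _INFO.get(k)) is not None), key=lambda t: t[0])
  let hits := PySem.List.sorted
    ((PySem.Dict.mk record_data).items.filterMap (fun kv =>
      match kv.2 with
      | some v =>
          match pvInfo.get? kv.1 with
          | some info => some (info.1, info.2, v)
          | none => none
      | none => none))
    (fun t => t.1)
  -- for _, new_key, v in hits: params[new_key] = v
  (hits.foldl (fun d t => d.insert t.2.1 t.2.2) (PySem.Dict.mk params)).items

-- ===== PRECONDITION & SPEC =====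
-- record_data models a Python dict (A consumes it via `in` and item lookups); an association
-- list with a duplicated key represents no Python dict, so such lists are outside the modelled
-- domain and are excluded.
def Pre_process_params (record_data : List (String × Option String)) (params : List (String × String)) : Prop :=
  (record_data.map Prod.fst).Nodup
instance (record_data : List (String × Option String)) (params : List (String × String)) : Decidable (Pre_process_params record_data params) := by unfold Pre_process_params; infer_instance

def pvWitness_process_params : (List (String × Option String)) × (List (String × String)) :=
  ([("host", some "www"), ("ttl", some "60"), ("caa_flag", some "0"), ("note", some "x"), ("mail", none)],
   [("auth-id", "7")])

def Spec_process_params (record_data : List (String × Option String)) (params : List (String × String)) (out : List (String × String)) : Prop := out = process_params_alt record_data params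
instance (record_data : List (String × Option String)) (params : List (String × String)) (out : List (String × String)) : Decidable (Spec_process_params record_data params out) := by unfold Spec_process_params; infer_instance

-- ===== CLAIM (what is proved, stated in full; the proofs are below) =====
def Claim_equal_process_params : Prop := ∀ (record_data : List (String × Option String)) (params : List (String × String)), Dom_process_params record_data params → Pre_process_params record_data params → Spec_process_params record_data params (process_params record_data params)

-- ===== LEMMAS AND PROOFS =====

-- the renamed key a whitelisted key is stored under
def pvRen (k : String) : String :=
  if PySem.Set.contains pvRetain k then k else PySem.Str.replace k "_" "-"

-- the (renamed key, value) pair key k contributes, given the data dict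
def pvG (rd : List (String × Option String)) (k : String) : Option (String × String) :=
  match (PySem.Dict.mk rd).get? k with
  | some (some v) => some (pvRen k, v)
  | _ => none

-- B's hit list in whitelist order: ranks attached by enumerate
def pvHits (rd : List (String × Option String)) (l : List String) (s : Int) : List (Int × String × String) :=
  (PySem.List.enumerate l s).filterMap (fun p =>
    match (PySem.Dict.mk rd).get? p.2 with
    | some (some v) => some (p.1, pvRen p.2, v)
    | _ => none)

theorem pvA_fold_eq (rd : List (String × Option String)) :
    ∀ (l : List String) (acc : PySem.Dict String String),
      l.foldl (fun acc key =>
          match (PySem.Dict.mk rd).get? key with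
          | some (some v) =>
              if PySem.Set.contains pvRetain key then acc.insert key v
              else acc.insert (PySem.Str.replace key "_" "-") v
          | _ => acc) acc
      = (l.filterMap (pvG rd)).foldl (fun d p => d.insert p.1 p.2) acc := by
  intro l
  induction l with
  | nil => intro acc; rfl
  | cons k t ih =>
    intro acc
    simp only [List.foldl_cons, List.filterMap_cons, pvG]
    cases h : (PySem.Dict.mk rd).get? k with
    | none => exact ih acc
    | some o =>
      cases o with
      | none => exact ih acc
      | some v =>
        simp only [pvRen]
        split_ifs with hc <;> exact ih _

theorem pvHits_map_proj (rd : List (String × Option String)) :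
    ∀ (l : List String) (s : Int),
      (pvHits rd l s).map (fun t => (t.2.1, t.2.2)) = l.filterMap (pvG rd) := by
  intro l
  induction l with
  | nil => intro s; rfl
  | cons k t ih =>
    intro s
    simp only [pvHits, PySem.List.enumerate_cons, List.filterMap_cons, pvG]
    cases h : (PySem.Dict.mk rd).get? k with
    | none => exact ih (s + 1)
    | some o =>
      cases o with
      | none => exact ih (s + 1)
      | some v =>
        simp only [List.map_cons]
        rw [← pvHits, ih (s + 1)]
        rfl

theorem pvHits_pairwise (rd : List (String × Option String)) (l : List String) (s : Int) :
    (pvHits rd l s).Pairwise (fun a b => a.1 < b.1) := by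
  unfold pvHits
  rw [List.pairwise_filterMap]
  have henum : (PySem.List.enumerate l s).Pairwise (fun a b => a.1 < b.1) := by
    have h := PySem.List.pairwise_lt_pyRange_one s (s + l.length)
    rw [← PySem.List.map_fst_enumerate] at h
    exact List.pairwise_map.mp h
  refine henum.imp ?_
  intro p q hpq b hb b' hb'
  have h1 : b.1 = p.1 := by
    revert hb
    cases (PySem.Dict.mk rd).get? p.2 with
    | none => intro h; cases h
    | some o => cases o with
      | none => intro h; cases h
      | some v => intro h; cases h; rfl
  have h2 : b'.1 = q.1 := by
    revert hb'
    cases (PySem.Dict.mk rd).get? q.2 with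
    | none => intro h; cases h
    | some o => cases o with
      | none => intro h; cases h
      | some v => intro h; cases h; rfl
  rw [h1, h2]; exact hpq

-- characterisation of the precomputed _INFO table
theorem pvInfo_get? (k : String) (i : Int) (nk : String) :
    pvInfo.get? k = some (i, nk) ↔ (i, k) ∈ PySem.List.enumerate pvKeysToCheck ∧ nk = pvRen k := by
  have hkeys : pvInfo.keys = pvKeysToCheck := by
    show (PySem.Dict.mk _).keys = _
    rw [PySem.Dict.keys_mk, List.map_map]
    exact PySem.List.map_snd_enumerate pvKeysToCheck 0
  have hnd : pvInfo.keys.Nodup := by rw [hkeys]; decide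
  rw [PySem.Dict.get?_eq_some_iff_mem_items pvInfo k (i, nk) hnd]
  have hitems : pvInfo.items = (PySem.List.enumerate pvKeysToCheck).map (fun p =>
      (p.2, (p.1, if PySem.Set.contains pvRetain p.2 then p.2 else PySem.Str.replace p.2 "_" "-"))) := rfl
  rw [hitems, List.mem_map]
  constructor
  · rintro ⟨p, hp, he⟩
    have h1 : p.2 = k := congrArg Prod.fst he
    have h2 : p.1 = i := congrArg (fun x => x.2.1) he
    have h3 : (if PySem.Set.contains pvRetain p.2 then p.2 else PySem.Str.replace p.2 "_" "-") = nk :=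
      congrArg (fun x => x.2.2) he
    refine ⟨?_, ?_⟩
    · rw [← h1, ← h2]; exact hp
    · rw [← h3, h1, pvRen]
  · rintro ⟨hp, hnk⟩
    exact ⟨(i, k), hp, by rw [hnk, pvRen]⟩

theorem pv_sorted_hits (rd : List (String × Option String))
    (hnd : (rd.map Prod.fst).Nodup) :
    PySem.List.sorted
      ((PySem.Dict.mk rd).items.filterMap (fun kv =>
        match kv.2 with
        | some v =>
            match pvInfo.get? kv.1 with
            | some info => some (info.1, info.2, v)
            | none => none
        | none => none))
      (fun t => t.1)
    = pvHits rd pvKeysToCheck 0 := by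
  have hkd : (PySem.Dict.mk rd).keys.Nodup := by rw [PySem.Dict.keys_mk]; exact hnd
  have hitems : (PySem.Dict.mk rd).items = rd := rfl
  have henumfst : (List.map (fun p => p.1) (PySem.List.enumerate pvKeysToCheck)).Nodup := by
    rw [PySem.List.map_fst_enumerate]
    exact PySem.List.nodup_pyRange_one _ _
  -- ranks identify whitelist keys
  have hinj : ∀ (k k' : String) (i : Int) (nk nk' : String),
      pvInfo.get? k = some (i, nk) → pvInfo.get? k' = some (i, nk') → k = k' := by
    intro k k' i nk nk' h1 h2
    have m1 := ((pvInfo_get? k i nk).mp h1).1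
    have m2 := ((pvInfo_get? k' i nk').mp h2).1
    exact congrArg Prod.snd (List.inj_on_of_nodup_map henumfst m1 m2 rfl)
  -- what the filterMap body returns
  have hfc : ∀ (kv : String × Option String) (t : Int × String × String),
      (match kv.2 with
       | some v =>
           match pvInfo.get? kv.1 with
           | some info => some (info.1, info.2, v)
           | none => none
       | none => none) = some t
      ↔ kv.2 = some t.2.2 ∧ pvInfo.get? kv.1 = some (t.1, t.2.1) := by
    rintro ⟨k, ov⟩ t
    cases ov with
    | none => simp
    | some v =>
      cases hi : pvInfo.get? k with
      | none => simp
      | some info =>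
        simp only [Option.some.injEq]
        constructor
        · rintro rfl; exact ⟨rfl, rfl⟩
        · rintro ⟨h1, h2⟩
          subst h1; subst h2
          rfl
  have hnodup_rd : rd.Nodup := hnd.of_map
  have hnodup_hits : (rd.filterMap (fun kv =>
      match kv.2 with
      | some v =>
          match pvInfo.get? kv.1 with
          | some info => some (info.1, info.2, v)
          | none => none
      | none => none)).Nodup := by
    refine List.Nodup.filterMap ?_ hnodup_rd
    intro a a' b hb hb'
    have h1 := (hfc a b).mp hb
    have h2 := (hfc a' b).mp hb'
    have hk : a.1 = a'.1 := hinj a.1 a'.1 b.1 b.2.1 b.2.1 h1.2 h2.2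
    have hv : a.2 = a'.2 := by rw [h1.1, h2.1]
    exact Prod.ext hk hv
  have hnodup_H : (pvHits rd pvKeysToCheck 0).Nodup := by
    refine (pvHits_pairwise rd pvKeysToCheck 0).imp ?_
    intro a b h he
    rw [he] at h
    exact lt_irrefl _ h
  have hmem : ∀ t, t ∈ pvHits rd pvKeysToCheck 0 ↔ t ∈ rd.filterMap (fun kv =>
      match kv.2 with
      | some v =>
          match pvInfo.get? kv.1 with
          | some info => some (info.1, info.2, v)
          | none => none
      | none => none) := by
    intro t
    unfold pvHits
    rw [List.mem_filterMap, List.mem_filterMap]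
    constructor
    · rintro ⟨p, hp, hfH⟩
      have hv : ∃ v, (PySem.Dict.mk rd).get? p.2 = some (some v) ∧ t = (p.1, pvRen p.2, v) := by
        revert hfH
        cases hg : (PySem.Dict.mk rd).get? p.2 with
        | none => intro h; cases h
        | some o => cases o with
          | none => intro h; cases h
          | some v => intro h; exact ⟨v, rfl, ((Option.some.injEq _ _).mp h).symm⟩
      obtain ⟨v, hg, ht⟩ := hv
      refine ⟨(p.2, some v), ?_, ?_⟩
      · rw [← hitems]
        exact PySem.Dict.mem_items_of_get?_eq_some _ hg
      · refine (hfc (p.2, some v) t).mpr ⟨by rw [ht], ?_⟩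
        rw [ht]
        exact (pvInfo_get? p.2 p.1 (pvRen p.2)).mpr ⟨by rw [Prod.mk.eta]; exact hp, rfl⟩
    · rintro ⟨kv, hkv, hf⟩
      obtain ⟨h1, h2⟩ := (hfc kv t).mp hf
      obtain ⟨hp, hnk⟩ := (pvInfo_get? kv.1 t.1 t.2.1).mp h2
      refine ⟨(t.1, kv.1), hp, ?_⟩
      have hg : (PySem.Dict.mk rd).get? kv.1 = some (some t.2.2) := by
        refine PySem.Dict.get?_of_mem_items _ ?_ hkd
        rw [hitems, ← h1, Prod.mk.eta]
        exact hkv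
      rw [hg, ← hnk]
  have hperm : (pvHits rd pvKeysToCheck 0).Perm (rd.filterMap (fun kv =>
      match kv.2 with
      | some v =>
          match pvInfo.get? kv.1 with
          | some info => some (info.1, info.2, v)
          | none => none
      | none => none)) :=
    (List.perm_ext_iff_of_nodup hnodup_H hnodup_hits).mpr hmem
  rw [hitems]
  exact PySem.List.sorted_eq_of_perm_of_pairwise_lt _ _ _ hperm (pvHits_pairwise rd pvKeysToCheck 0)

-- ===== VERDICT (by name: the statement is the Claim_ definition above) =====
theorem process_params_spec : Claim_equal_process_params := by
  intro record_data params _ hpre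
  unfold Spec_process_params process_params process_params_alt
  rw [pvA_fold_eq, pv_sorted_hits record_data hpre,
    ← pvHits_map_proj record_data pvKeysToCheck 0, List.foldl_map]
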